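-- pv_equiv track=rewrite | github.com/rishabh1jain/Dissertation | util.py | get_all_out_edges_with_exception_recursively
-- ===== SOURCE A (Python) =====
-- def get_all_out_edges_with_exception_recursively_helper(out_edges,whose,exceptions,immediate):
-- 	temp = []
-- 	if whose in out_edges:
-- 		for j in out_edges[whose]:
-- 			if immediate is True and j[0] not in exceptions:
-- 				temp.append(j[1])
-- 			elif immediate is False:
-- 				temp.append(j[1])
-- 		return temp
-- 	return temp
--
-- def get_all_out_edges_with_exception_recursively(out_edges,whose,exceptions):
-- 	temp = get_all_out_edges_with_exception_recursively_helper(out_edges,whose,exceptions,True)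
-- 	immediate_out_edges = temp
-- 	if len(immediate_out_edges) == 0: #The word itself has no dependents
-- 		return []
-- 	else:
-- 		o = len(immediate_out_edges)
-- 		i = 0
-- 		while(i<o):
-- 			immediate_out_edges = immediate_out_edges + get_all_out_edges_with_exception_recursively_helper(out_edges,immediate_out_edges[i],exceptions,False)
-- 			o = len(immediate_out_edges)
-- 			i = i + 1
-- 		return immediate_out_edges
-- ===== SOURCE B (Python) =====
-- def get_all_out_edges_with_exception_recursively(out_edges, whose, exceptions):
--     frontier = [t for s, t in out_edges.get(whose, []) if s not in exceptions]
--     if not frontier: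
--         return []
--     result = list(frontier)
--     while frontier:
--         nxt = [t for node in frontier for _s, t in out_edges.get(node, [])]
--         result += nxt
--         frontier = nxt
--     return result
-- ===== Notes on version B (the rewrite author's own statement) =====
-- stated objective: simpler
-- what changed: A walks an index down a single ever-growing queue list, re-filtering via a shared helper with an 'immediate' flag; B computes the immediate frontier once and then runs a level-synchronous BFS (result += next level, frontier = next level), which yields the same concatenation order without the index/flag machinery.
import Mathlib
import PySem

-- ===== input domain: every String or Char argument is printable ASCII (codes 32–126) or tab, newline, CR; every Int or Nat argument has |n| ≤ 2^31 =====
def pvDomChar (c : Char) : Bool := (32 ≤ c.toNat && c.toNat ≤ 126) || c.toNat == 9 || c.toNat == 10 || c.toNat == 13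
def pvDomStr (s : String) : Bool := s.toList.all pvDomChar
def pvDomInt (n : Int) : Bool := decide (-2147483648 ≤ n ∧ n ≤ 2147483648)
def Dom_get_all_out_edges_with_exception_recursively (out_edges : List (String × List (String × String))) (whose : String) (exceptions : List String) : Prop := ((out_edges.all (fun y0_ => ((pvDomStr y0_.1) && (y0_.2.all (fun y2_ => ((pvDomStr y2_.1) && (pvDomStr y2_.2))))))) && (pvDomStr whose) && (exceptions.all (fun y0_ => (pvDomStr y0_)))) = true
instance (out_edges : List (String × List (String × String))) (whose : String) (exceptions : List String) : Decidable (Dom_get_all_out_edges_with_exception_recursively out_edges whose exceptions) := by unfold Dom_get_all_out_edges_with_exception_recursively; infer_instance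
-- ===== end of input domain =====

-- B rewrites A's index-walking growing queue as a level-synchronous BFS (objective: simpler);
-- same return value on every input where A's loop terminates (Pre_ below).

-- ===== PORT A =====
-- first-match association-list lookup = Python dict lookup under the task's type convention
def pvLookup (oe : List (String × List (String × String))) (x : String) : Option (List (String × String)) :=
  (oe.find? (fun p => p.1 == x)).map (fun p => p.2)

def get_all_out_edges_with_exception_recursively_helper (out_edges : List (String × List (String × String))) (whose : String) (exceptions : List String) (immediate : Bool) : List String :=
  if (pvLookup out_edges whose).isSome then
    ((pvLookup out_edges whose).getD []).foldl
      (fun temp j =>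
        if immediate == true && !(exceptions.contains j.1) then temp ++ [j.2]
        else if immediate == false then temp ++ [j.2]
        else temp) []
  else []

-- targets of one node, no exception filter (= helper with immediate=False; also B's inner comprehension)
def pvH (oe : List (String × List (String × String))) (x : String) : List String :=
  ((pvLookup oe x).getD []).map (fun j => j.2)

-- level-by-level expansion; used by port A only to COMPUTE its fuel guard (proved sufficient under Pre_)
def pvChunks (oe : List (String × List (String × String))) : List String → Nat → List String
  | _, 0 => []
  | front, n+1 => front.flatMap (pvH oe) ++ pvChunks oe (front.flatMap (pvH oe)) n

-- A's while loop, verbatim (fuel is only a termination guard)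
def pvLoopA (oe : List (String × List (String × String))) (exceptions : List String) : Nat → List String → Nat → List String
  | 0, q, _ => q
  | f+1, q, i =>
    if i < q.length then
      pvLoopA oe exceptions f (q ++ get_all_out_edges_with_exception_recursively_helper oe (q.getD i "") exceptions false) (i+1)
    else q

def get_all_out_edges_with_exception_recursively (out_edges : List (String × List (String × String))) (whose : String) (exceptions : List String) : List String :=
  let temp := get_all_out_edges_with_exception_recursively_helper out_edges whose exceptions true
  if temp.length = 0 then []
  else pvLoopA out_edges exceptions (temp.length + (pvChunks out_edges temp (out_edges.length + 1)).length) temp 0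

-- ===== PORT B =====
-- B's while loop: result/frontier pair, one level per step (fuel is only a termination guard)
def pvLoopB (oe : List (String × List (String × String))) : Nat → List String → List String → List String
  | 0, res, _ => res
  | f+1, res, front =>
    if front = [] then res
    else
      let nxt := front.flatMap (pvH oe)
      pvLoopB oe f (res ++ nxt) nxt

def get_all_out_edges_with_exception_recursively_alt (out_edges : List (String × List (String × String))) (whose : String) (exceptions : List String) : List String :=
  let frontier := (((pvLookup out_edges whose).getD []).filter (fun j => !(exceptions.contains j.1))).map (fun j => j.2)
  if frontier = [] then []
  else pvLoopB out_edges (out_edges.length + 2) frontier frontier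

-- ===== PRECONDITION & SPEC =====
-- everything reachable from S in at most n steps (frontier by frontier, duplicates kept; only membership matters)
def pvReach (oe : List (String × List (String × String))) : List String → Nat → List String
  | s, 0 => s
  | s, n+1 => s ++ pvReach oe (s.flatMap (pvH oe)) n

-- Pre_: no node reachable from the immediate frontier lies on a cycle (paths of length ≤ |out_edges|
-- suffice, since a shortest path repeats no key) — exactly the inputs on which A's while loop terminates.
def Pre_get_all_out_edges_with_exception_recursively (out_edges : List (String × List (String × String))) (whose : String) (exceptions : List String) : Prop :=
  ∀ x ∈ pvReach out_edges ((((pvLookup out_edges whose).getD []).filter (fun j => !(exceptions.contains j.1))).map (fun j => j.2)) out_edges.length,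
    x ∉ pvReach out_edges (pvH out_edges x) out_edges.length

instance (out_edges : List (String × List (String × String))) (whose : String) (exceptions : List String) : Decidable (Pre_get_all_out_edges_with_exception_recursively out_edges whose exceptions) := by unfold Pre_get_all_out_edges_with_exception_recursively; infer_instance

def pvWitness_get_all_out_edges_with_exception_recursively : (List (String × List (String × String))) × String × List String :=
  ([("a", [("p", "b"), ("q", "c")]), ("c", [("r", "d")])], "a", ["q"])

def Spec_get_all_out_edges_with_exception_recursively (out_edges : List (String × List (String × String))) (whose : String) (exceptions : List String) (out : List String) : Prop := out = get_all_out_edges_with_exception_recursively_alt out_edges whose exceptions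
instance (out_edges : List (String × List (String × String))) (whose : String) (exceptions : List String) (out : List String) : Decidable (Spec_get_all_out_edges_with_exception_recursively out_edges whose exceptions out) := by unfold Spec_get_all_out_edges_with_exception_recursively; infer_instance

-- ===== CLAIM (what is proved, stated in full; the proofs are below) =====
def Claim_equal_get_all_out_edges_with_exception_recursively : Prop := ∀ (out_edges : List (String × List (String × String))) (whose : String) (exceptions : List String), Dom_get_all_out_edges_with_exception_recursively out_edges whose exceptions → Pre_get_all_out_edges_with_exception_recursively out_edges whose exceptions → Spec_get_all_out_edges_with_exception_recursively out_edges whose exceptions (get_all_out_edges_with_exception_recursively out_edges whose exceptions)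

-- ===== LEMMAS AND PROOFS =====

-- the step relation: b is a direct dependent of a
def pvR (oe : List (String × List (String × String))) (a b : String) : Prop := b ∈ pvH oe a

-- A's queue expansion, recursively: process the pending list front to back, appending children
def pvExpand (oe : List (String × List (String × String))) : Nat → List String → List String
  | 0, _ => []
  | _+1, [] => []
  | f+1, x :: xs => pvH oe x ++ pvExpand oe f (xs ++ pvH oe x)

theorem pvExpand_nil (oe : List (String × List (String × String))) (f : Nat) : pvExpand oe f [] = [] := by
  cases f <;> rfl

theorem pvHelper_false (oe : List (String × List (String × String))) (x : String) (exc : List String) :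
    get_all_out_edges_with_exception_recursively_helper oe x exc false = pvH oe x := by
  unfold get_all_out_edges_with_exception_recursively_helper pvH
  cases h : pvLookup oe x with
  | none => simp [h]
  | some l =>
    simp only [h, Option.isSome_some, if_true, Option.getD_some]
    have hf : ∀ (l : List (String × String)) (acc : List String),
        l.foldl (fun temp j =>
          if (false : Bool) == true && !(exc.contains j.1) then temp ++ [j.2]
          else if (false : Bool) == false then temp ++ [j.2]
          else temp) acc = acc ++ l.map (fun j => j.2) := by
      intro l
      induction l with
      | nil => intro acc; simp
      | cons a t ih =>
        intro acc
        rw [List.foldl_cons, ih]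
        simp [List.append_assoc]
    simpa using hf l []

theorem pvHelper_true (oe : List (String × List (String × String))) (x : String) (exc : List String) :
    get_all_out_edges_with_exception_recursively_helper oe x exc true
      = (((pvLookup oe x).getD []).filter (fun j => !(exc.contains j.1))).map (fun j => j.2) := by
  unfold get_all_out_edges_with_exception_recursively_helper
  cases h : pvLookup oe x with
  | none => simp [h]
  | some l =>
    simp only [h, Option.isSome_some, if_true, Option.getD_some]
    have hf : ∀ (l : List (String × String)) (acc : List String),
        l.foldl (fun temp j =>
          if (true : Bool) == true && !(exc.contains j.1) then temp ++ [j.2]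
          else if (true : Bool) == false then temp ++ [j.2]
          else temp) acc = acc ++ (l.filter (fun j => !(exc.contains j.1))).map (fun j => j.2) := by
      intro l
      induction l with
      | nil => intro acc; simp
      | cons a t ih =>
        intro acc
        rw [List.foldl_cons, ih]
        by_cases hc : a.1 ∈ exc <;>
          simp [hc, List.filter_cons, List.append_assoc]
    simpa using hf l []

-- A's loop computes the queue followed by the pending expansion, at the SAME fuel
theorem pvLoopA_eq (oe : List (String × List (String × String))) (exc : List String) :
    ∀ (f : Nat) (q : List String) (i : Nat), i ≤ q.length →
      pvLoopA oe exc f q i = q ++ pvExpand oe f (q.drop i) := by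
  intro f
  induction f with
  | zero => intro q i _; simp [pvLoopA, pvExpand]
  | succ f ih =>
    intro q i hi
    by_cases h : i < q.length
    · have hq : q.getD i "" = q[i] := List.getD_eq_getElem q "" h
      have hdrop : q.drop i = q[i] :: q.drop (i+1) := List.drop_eq_getElem_cons h
      have hstep : pvLoopA oe exc (f+1) q i
          = pvLoopA oe exc f (q ++ pvH oe q[i]) (i+1) := by
        simp [pvLoopA, h, hq, pvHelper_false]
      rw [hstep, ih (q ++ pvH oe q[i]) (i+1) (by simp [List.length_append]; omega)]
      have hdrop2 : (q ++ pvH oe q[i]).drop (i+1) = q.drop (i+1) ++ pvH oe q[i] :=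
        List.drop_append_of_le_length h
      rw [hdrop2, hdrop]
      simp [pvExpand, List.append_assoc]
    · have : ¬ i < q.length := h
      have hdrop : q.drop i = [] := List.drop_eq_nil_of_le (by omega)
      simp [pvLoopA, this, hdrop, pvExpand_nil]

-- processing a block a of the pending list first emits a's children, leaving them pending after b
theorem pvExpand_append (oe : List (String × List (String × String))) :
    ∀ (a b : List String) (f : Nat),
      pvExpand oe (a.length + f) (a ++ b)
        = a.flatMap (pvH oe) ++ pvExpand oe f (b ++ a.flatMap (pvH oe)) := by
  intro a
  induction a with
  | nil => intro b f; simp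
  | cons x a' ih =>
    intro b f
    have hn : (x :: a').length + f = (a'.length + f) + 1 := by simp [List.length_cons]; omega
    rw [hn]
    show pvH oe x ++ pvExpand oe (a'.length + f) ((a' ++ b) ++ pvH oe x) = _
    rw [List.append_assoc a' b (pvH oe x), ih (b ++ pvH oe x) f]
    simp [List.flatMap_cons, List.append_assoc]

theorem pvChunks_nil (oe : List (String × List (String × String))) : ∀ n, pvChunks oe [] n = [] := by
  intro n
  induction n with
  | zero => rfl
  | succ n ih => simp [pvChunks, ih]

-- once the m-th frontier is empty, the queue expansion (with exactly enough fuel) is the level concatenation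
theorem pvExpand_eq_chunks (oe : List (String × List (String × String))) :
    ∀ (m : Nat) (xs : List String) (f : Nat),
      (fun s => s.flatMap (pvH oe))^[m] xs = [] →
      pvExpand oe (xs.length + (pvChunks oe xs m).length + f) xs = pvChunks oe xs m := by
  intro m
  induction m with
  | zero =>
    intro xs f h
    simp only [Function.iterate_zero, id] at h
    subst h
    simp [pvChunks, pvExpand_nil]
  | succ m ih =>
    intro xs f h
    have h' : (fun s => s.flatMap (pvH oe))^[m] (xs.flatMap (pvH oe)) = [] := by
      rw [← Function.iterate_succ_apply]; exact h
    have hch : pvChunks oe xs (m+1) = xs.flatMap (pvH oe) ++ pvChunks oe (xs.flatMap (pvH oe)) m := rfl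
    rw [hch]
    have hlen : xs.length + (xs.flatMap (pvH oe) ++ pvChunks oe (xs.flatMap (pvH oe)) m).length + f
        = xs.length + ((xs.flatMap (pvH oe)).length + (pvChunks oe (xs.flatMap (pvH oe)) m).length + f) := by
      simp [List.length_append]; omega
    rw [hlen]
    have := pvExpand_append oe xs [] ((xs.flatMap (pvH oe)).length + (pvChunks oe (xs.flatMap (pvH oe)) m).length + f)
    simp only [List.append_nil, List.nil_append] at this
    rw [this, ih (xs.flatMap (pvH oe)) f h']

-- B's loop is the result followed by the level concatenation, at any fuel
theorem pvLoopB_eq (oe : List (String × List (String × String))) :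
    ∀ (f : Nat) (res front : List String), pvLoopB oe f res front = res ++ pvChunks oe front f := by
  intro f
  induction f with
  | zero => intro res front; simp [pvLoopB, pvChunks]
  | succ f ih =>
    intro res front
    by_cases h : front = []
    · subst h; simp [pvLoopB, pvChunks_nil]
    · simp [pvLoopB, h, ih, pvChunks, List.append_assoc]

-- extra fuel after the frontiers die changes nothing
theorem pvChunks_stable (oe : List (String × List (String × String))) :
    ∀ (m : Nat) (xs : List String), (fun s => s.flatMap (pvH oe))^[m] xs = [] →
      ∀ e, pvChunks oe xs (m + e) = pvChunks oe xs m := by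
  intro m
  induction m with
  | zero =>
    intro xs h e
    simp only [Function.iterate_zero, id] at h
    subst h
    simp [pvChunks_nil, pvChunks]
  | succ m ih =>
    intro xs h e
    have h' : (fun s => s.flatMap (pvH oe))^[m] (xs.flatMap (pvH oe)) = [] := by
      rw [← Function.iterate_succ_apply]; exact h
    have : m + 1 + e = (m + e) + 1 := by omega
    rw [this]
    show xs.flatMap (pvH oe) ++ pvChunks oe (xs.flatMap (pvH oe)) (m + e)
        = xs.flatMap (pvH oe) ++ pvChunks oe (xs.flatMap (pvH oe)) m
    rw [ih (xs.flatMap (pvH oe)) h' e]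

theorem pvMem_reach (oe : List (String × List (String × String))) (S : List String) (n : Nat) :
    ∀ x ∈ S, x ∈ pvReach oe S n := by
  cases n <;> intro x hx <;> simp [pvReach, hx]

-- a chain of length ≤ n starting in S ends inside the n-step reach of S
theorem pvChain_reach (oe : List (String × List (String × String))) :
    ∀ (c : List String) (x : String) (S : List String) (n : Nat),
      List.IsChain (pvR oe) (x :: c) → x ∈ S → c.length ≤ n →
      ∀ z, (x :: c).getLast? = some z → z ∈ pvReach oe S n := by
  intro c
  induction c with
  | nil =>
    intro x S n _ hxS _ z hz
    simp only [List.getLast?_singleton, Option.some.injEq] at hz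
    exact hz ▸ pvMem_reach oe S n x hxS
  | cons y c' ih =>
    intro x S n hch hxS hlen z hz
    cases n with
    | zero => simp at hlen
    | succ n' =>
      have hR : pvR oe x y := List.rel_of_isChain_cons_cons hch
      have hch' : List.IsChain (pvR oe) (y :: c') := hch.of_cons
      have hy : y ∈ S.flatMap (pvH oe) := List.mem_flatMap.mpr ⟨x, hxS, hR⟩
      have hz' : (y :: c').getLast? = some z := by
        rw [← List.getLast?_cons_cons (a := x)]; exact hz
      have hlen' : c'.length ≤ n' := by
        simp only [List.length_cons] at hlen
        omega
      have hrec := ih y (S.flatMap (pvH oe)) n' hch' hy hlen' z hz'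
      show z ∈ S ++ pvReach oe (S.flatMap (pvH oe)) n'
      exact List.mem_append_right _ hrec

-- every element of the m-th frontier is the end of a chain of length m from xs
theorem pvIterate_chain (oe : List (String × List (String × String))) :
    ∀ (m : Nat) (xs : List String) (z : String),
      z ∈ (fun s => s.flatMap (pvH oe))^[m] xs →
      ∃ x c, x ∈ xs ∧ List.IsChain (pvR oe) (x :: c) ∧ c.length = m ∧ (x :: c).getLast? = some z := by
  intro m
  induction m with
  | zero =>
    intro xs z hz
    simp only [Function.iterate_zero, id] at hz
    exact ⟨z, [], hz, List.isChain_singleton z, rfl, rfl⟩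
  | succ m ih =>
    intro xs z hz
    rw [Function.iterate_succ_apply'] at hz
    obtain ⟨y, hy, hzy⟩ := List.mem_flatMap.mp hz
    obtain ⟨x, c, hx, hch, hlen, hlast⟩ := ih xs y hy
    have hcons : x :: (c ++ [z]) = (x :: c) ++ [z] := by simp
    refine ⟨x, c ++ [z], hx, ?_, by simp [hlen], ?_⟩
    · rw [hcons]
      refine List.isChain_append.mpr ⟨hch, List.isChain_singleton z, ?_⟩
      intro a ha b hb
      simp only [List.head?_cons, Option.mem_def, Option.some.injEq] at hb
      subst hb
      rw [hlast] at ha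
      simp only [Option.mem_def, Option.some.injEq] at ha
      subst ha
      exact hzy
    · rw [hcons, List.getLast?_concat]

-- every chain element except the last is a key of out_edges
theorem pvChain_keys (oe : List (String × List (String × String))) :
    ∀ (c : List String), List.IsChain (pvR oe) c → ∀ x ∈ c.dropLast, x ∈ oe.map (fun p => p.1) := by
  intro c
  induction c with
  | nil => intro _ x hx; simp at hx
  | cons a t ih =>
    intro hch x hx
    cases t with
    | nil => simp at hx
    | cons b t' =>
      rw [List.dropLast_cons₂] at hx
      have hR : pvR oe a b := List.rel_of_isChain_cons_cons hch
      have hch' : List.IsChain (pvR oe) (b :: t') := hch.of_cons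
      rcases List.mem_cons.mp hx with h | h
      · subst h
        unfold pvR pvH at hR
        cases hfind : pvLookup oe x with
        | none => rw [hfind] at hR; simp at hR
        | some l =>
          unfold pvLookup at hfind
          obtain ⟨p, hp, -⟩ : ∃ p, oe.find? (fun p => p.1 == x) = some p ∧ p.2 = l := by
            cases hf : oe.find? (fun p => p.1 == x) with
            | none => rw [hf] at hfind; simp at hfind
            | some p => rw [hf] at hfind; simp at hfind; exact ⟨p, rfl, hfind⟩
          have hmem : p ∈ oe := List.mem_of_find?_eq_some hp
          have heq : p.1 = x := by
            have := List.find?_some hp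
            simpa using this
          exact List.mem_map.mpr ⟨p, hmem, heq⟩
      · exact ih hch' x h

theorem pvNodup_len_le (l keys : List String) (hsub : ∀ x ∈ l, x ∈ keys) (hnd : l.Nodup) :
    l.length ≤ keys.length := by
  have h1 : l.toFinset.card = l.length := List.toFinset_card_of_nodup hnd
  have h2 : l.toFinset ⊆ keys.toFinset := by
    intro x hx
    rw [List.mem_toFinset] at *
    exact hsub x hx
  have h5 : l.toFinset.card ≤ keys.toFinset.card := Finset.card_le_card h2
  have h3 : keys.toFinset.card = keys.dedup.length := List.card_toFinset keys
  have h4 : keys.dedup.length ≤ keys.length := (List.dedup_sublist keys).length_le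
  omega

theorem pvExists_dup : ∀ (l : List String), ¬ l.Nodup → ∃ a x b c, l = a ++ x :: b ++ x :: c := by
  intro l
  induction l with
  | nil => intro h; exact absurd List.nodup_nil h
  | cons y ys ih =>
    intro h
    by_cases hy : y ∈ ys
    · obtain ⟨s, t, rfl⟩ := List.append_of_mem hy
      exact ⟨[], y, s, t, by simp⟩
    · have hys : ¬ ys.Nodup := by
        intro hnd
        exact h (List.nodup_cons.mpr ⟨hy, hnd⟩)
      obtain ⟨a, x, b, c, rfl⟩ := ih hys
      exact ⟨y :: a, x, b, c, by simp⟩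

-- under Pre_, the frontier iterated |out_edges|+1 times from the immediate frontier is empty
theorem pvFrontier_dies (oe : List (String × List (String × String))) (q0 : List String)
    (hpre : ∀ x ∈ pvReach oe q0 oe.length, x ∉ pvReach oe (pvH oe x) oe.length) :
    (fun s => s.flatMap (pvH oe))^[oe.length + 1] q0 = [] := by
  rw [List.eq_nil_iff_forall_not_mem]
  intro z hz
  obtain ⟨x, c, hx, hch, hlen, -⟩ := pvIterate_chain oe (oe.length + 1) q0 z hz
  have hCne : (x :: c) ≠ [] := by simp
  have hdlen : (x :: c).dropLast.length = oe.length + 1 := by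
    simp [List.length_dropLast, hlen]
  have hdkeys : ∀ w ∈ (x :: c).dropLast, w ∈ oe.map (fun p => p.1) := pvChain_keys oe (x :: c) hch
  have hdchain : List.IsChain (pvR oe) (x :: c).dropLast := by
    have hsplit : (x :: c) = (x :: c).dropLast ++ [(x :: c).getLast hCne] :=
      (List.dropLast_append_getLast hCne).symm
    exact List.IsChain.left_of_append (hsplit ▸ hch)
  have hdhead : ((x :: c).dropLast).head? = some x := by
    cases c with
    | nil => simp at hlen
    | cons c₀ cs => rw [List.dropLast_cons₂]; rfl
  -- pigeonhole: dropLast repeats some w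
  have hnotnodup : ¬ ((x :: c).dropLast).Nodup := by
    intro hnd
    have hle := pvNodup_len_le _ (oe.map (fun p => p.1)) hdkeys hnd
    rw [hdlen, List.length_map] at hle
    omega
  obtain ⟨a, w, b, e, hsplit⟩ := pvExists_dup _ hnotnodup
  have hlens : a.length + b.length + e.length + 2 = oe.length + 1 := by
    have hl := congrArg List.length hsplit
    rw [hdlen] at hl
    simp [List.length_append] at hl
    omega
  -- (i) w is reachable from q0
  have hw1 : w ∈ pvReach oe q0 oe.length := by
    have hsplit1 : (x :: c).dropLast = (a ++ [w]) ++ (b ++ w :: e) := by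
      rw [hsplit]; simp
    have hchP : List.IsChain (pvR oe) (a ++ [w]) :=
      List.IsChain.left_of_append (hsplit1 ▸ hdchain)
    cases a with
    | nil =>
      have hwx : w = x := by
        rw [hsplit] at hdhead
        simpa using hdhead
      subst hwx
      exact pvMem_reach oe q0 oe.length w hx
    | cons a₀ a' =>
      have ha₀ : a₀ = x := by
        rw [hsplit] at hdhead
        simpa using hdhead
      have hchP' : List.IsChain (pvR oe) (x :: (a' ++ [w])) := by
        rw [← ha₀]
        simpa using hchP
      refine pvChain_reach oe (a' ++ [w]) x q0 oe.length hchP' hx ?_ w ?_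
      · simp only [List.length_cons] at hlens
        simp only [List.length_append, List.length_singleton]
        omega
      · have : x :: (a' ++ [w]) = (x :: a') ++ [w] := by simp
        rw [this, List.getLast?_concat]
  -- (ii) w is reachable from its own children
  have hw2 : w ∈ pvReach oe (pvH oe w) oe.length := by
    have hsplit2 : (x :: c).dropLast = a ++ ((w :: (b ++ [w])) ++ e) := by
      rw [hsplit]; simp
    have hchIe : List.IsChain (pvR oe) ((w :: (b ++ [w])) ++ e) :=
      List.IsChain.right_of_append (hsplit2 ▸ hdchain)
    have hchI : List.IsChain (pvR oe) (w :: (b ++ [w])) :=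
      List.IsChain.left_of_append hchIe
    cases b with
    | nil =>
      have hR : pvR oe w w := by simpa using hchI
      exact pvMem_reach oe (pvH oe w) oe.length w hR
    | cons b₀ b' =>
      have hchI' : List.IsChain (pvR oe) (w :: b₀ :: (b' ++ [w])) := by simpa using hchI
      have hR : pvR oe w b₀ := List.rel_of_isChain_cons_cons hchI'
      have hcht : List.IsChain (pvR oe) (b₀ :: (b' ++ [w])) := hchI'.of_cons
      refine pvChain_reach oe (b' ++ [w]) b₀ (pvH oe w) oe.length hcht hR ?_ w ?_
      · simp only [List.length_cons] at hlens
        simp only [List.length_append, List.length_singleton]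
        omega
      · have : b₀ :: (b' ++ [w]) = (b₀ :: b') ++ [w] := by simp
        rw [this, List.getLast?_concat]
  exact hpre w hw1 hw2

-- ===== VERDICT (by name: the statement is the Claim_ definition above) =====
theorem get_all_out_edges_with_exception_recursively_spec : Claim_equal_get_all_out_edges_with_exception_recursively := by
  intro oe whose exc _dom hpre
  unfold Spec_get_all_out_edges_with_exception_recursively
  unfold get_all_out_edges_with_exception_recursively get_all_out_edges_with_exception_recursively_alt
  simp only [pvHelper_true]
  set q0 := (((pvLookup oe whose).getD []).filter (fun j => !(exc.contains j.1))).map (fun j => j.2) with hq0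
  by_cases hq : q0 = []
  · simp [hq]
  · have hlen0 : ¬ q0.length = 0 := by simpa [List.length_eq_zero_iff] using hq
    simp only [hq, hlen0, if_false]
    have hdies : (fun s => s.flatMap (pvH oe))^[oe.length + 1] q0 = [] :=
      pvFrontier_dies oe q0 (by exact hpre)
    have hA : pvLoopA oe exc (q0.length + (pvChunks oe q0 (oe.length + 1)).length) q0 0
        = q0 ++ pvExpand oe (q0.length + (pvChunks oe q0 (oe.length + 1)).length) q0 := by
      have := pvLoopA_eq oe exc (q0.length + (pvChunks oe q0 (oe.length + 1)).length) q0 0 (by omega)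
      simpa using this
    have hE : pvExpand oe (q0.length + (pvChunks oe q0 (oe.length + 1)).length) q0
        = pvChunks oe q0 (oe.length + 1) := by
      have := pvExpand_eq_chunks oe (oe.length + 1) q0 0 hdies
      simpa using this
    have hB : pvLoopB oe (oe.length + 2) q0 q0 = q0 ++ pvChunks oe q0 (oe.length + 2) :=
      pvLoopB_eq oe (oe.length + 2) q0 q0
    have hstab : pvChunks oe q0 (oe.length + 2) = pvChunks oe q0 (oe.length + 1) := by
      have := pvChunks_stable oe (oe.length + 1) q0 hdies 1
      simpa using this
    rw [hA, hE, hB, hstab]
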